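-- pv_equiv track=rewrite | github.com/OmniNode-ai/omniintelligence | migration_sources/omniarchon/scripts/intelligence_hook.py | _detect_architecture_patterns
-- ===== SOURCE A (Python) =====
-- from typing import Any, Dict, List, Optional
--
-- def _detect_architecture_patterns(
--     file_changes: List[Dict[str, Any]]
-- ) -> List[str]:
--     """Detect architectural patterns from file changes."""
--     patterns = []
--     filenames = [change.get("filename", "") for change in file_changes]
--
--     # Microservices patterns
--     if any("service" in f.lower() for f in filenames):
--         patterns.append("Microservices")
--
--     # API patterns
--     if any("api" in f.lower() or "endpoint" in f.lower() for f in filenames):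
--         patterns.append("REST API")
--
--     # Database patterns
--     if any(
--         "model" in f.lower() or "schema" in f.lower() or "migration" in f.lower()
--         for f in filenames
--     ):
--         patterns.append("Database Layer")
--
--     # Frontend patterns
--     if any(f.endswith((".tsx", ".jsx", ".vue", ".svelte")) for f in filenames):
--         patterns.append("Component-Based UI")
--
--     # Configuration patterns
--     if any(
--         f.endswith((".yml", ".yaml", ".toml", ".json")) and "config" in f.lower()
--         for f in filenames
--     ):
--         patterns.append("Configuration Management")
--
--     # Docker patterns
--     if any("docker" in f.lower() or f == "Dockerfile" for f in filenames):
--         patterns.append("Containerization")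
--
--     return patterns
-- ===== SOURCE B (Python) =====
-- def _detect_architecture_patterns(file_changes):
--     """Detect architectural patterns from file changes in a single pass."""
--     micro = api = db = ui = cfg = docker = False
--     for change in file_changes:
--         f = change.get("filename", "")
--         fl = f.lower()
--         micro = micro or "service" in fl
--         api = api or "api" in fl or "endpoint" in fl
--         db = db or "model" in fl or "schema" in fl or "migration" in fl
--         ui = ui or f.endswith((".tsx", ".jsx", ".vue", ".svelte"))
--         cfg = cfg or (f.endswith((".yml", ".yaml", ".toml", ".json")) and "config" in fl)
--         docker = docker or "docker" in fl or f == "Dockerfile"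
--     patterns = []
--     if micro: patterns.append("Microservices")
--     if api: patterns.append("REST API")
--     if db: patterns.append("Database Layer")
--     if ui: patterns.append("Component-Based UI")
--     if cfg: patterns.append("Configuration Management")
--     if docker: patterns.append("Containerization")
--     return patterns
-- ===== Notes on version B (the rewrite author's own statement) =====
-- stated objective: alternative
-- what changed: B replaces A's six separate any(...) scans over the filename list with one loop over file_changes that OR-accumulates six boolean flags per file, then emits the labels in the fixed order from the flags.
import Mathlib
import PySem

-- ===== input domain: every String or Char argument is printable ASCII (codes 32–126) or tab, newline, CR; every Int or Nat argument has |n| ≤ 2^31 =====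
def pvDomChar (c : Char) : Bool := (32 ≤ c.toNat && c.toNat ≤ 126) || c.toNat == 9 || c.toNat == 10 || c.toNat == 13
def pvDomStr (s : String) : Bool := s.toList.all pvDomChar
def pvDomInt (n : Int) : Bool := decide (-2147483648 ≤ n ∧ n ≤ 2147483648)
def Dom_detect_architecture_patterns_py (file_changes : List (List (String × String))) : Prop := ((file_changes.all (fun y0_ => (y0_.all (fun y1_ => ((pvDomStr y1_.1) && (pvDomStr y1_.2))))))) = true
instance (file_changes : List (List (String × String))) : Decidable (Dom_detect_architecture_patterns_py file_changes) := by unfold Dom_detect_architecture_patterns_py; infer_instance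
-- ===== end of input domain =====

-- B replaces A's six separate any(...) scans with one loop over file_changes OR-accumulating
-- six boolean flags, then emits the labels in the fixed order; same predicates, same output.

-- ===== PORT A =====
def detect_architecture_patterns_py (file_changes : List (List (String × String))) : List String :=
  let filenames := file_changes.map (fun change => (PySem.Dict.ofList change).getD "filename" "")
  let patterns : List String := []
  let patterns := if filenames.any (fun f => PySem.Str.isIn "service" (PySem.Str.lower f))
    then patterns ++ ["Microservices"] else patterns
  let patterns := if filenames.any (fun f => PySem.Str.isIn "api" (PySem.Str.lower f) || PySem.Str.isIn "endpoint" (PySem.Str.lower f))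
    then patterns ++ ["REST API"] else patterns
  let patterns := if filenames.any (fun f => PySem.Str.isIn "model" (PySem.Str.lower f) || PySem.Str.isIn "schema" (PySem.Str.lower f) || PySem.Str.isIn "migration" (PySem.Str.lower f))
    then patterns ++ ["Database Layer"] else patterns
  let patterns := if filenames.any (fun f => PySem.Str.endswith f ".tsx" || PySem.Str.endswith f ".jsx" || PySem.Str.endswith f ".vue" || PySem.Str.endswith f ".svelte")
    then patterns ++ ["Component-Based UI"] else patterns
  let patterns := if filenames.any (fun f => (PySem.Str.endswith f ".yml" || PySem.Str.endswith f ".yaml" || PySem.Str.endswith f ".toml" || PySem.Str.endswith f ".json") && PySem.Str.isIn "config" (PySem.Str.lower f))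
    then patterns ++ ["Configuration Management"] else patterns
  let patterns := if filenames.any (fun f => PySem.Str.isIn "docker" (PySem.Str.lower f) || f == "Dockerfile")
    then patterns ++ ["Containerization"] else patterns
  patterns

-- ===== PORT B =====
-- one step of B's single loop: OR each category's per-file predicate into the six flags
def pvStep (acc : Bool × Bool × Bool × Bool × Bool × Bool) (change : List (String × String)) :
    Bool × Bool × Bool × Bool × Bool × Bool :=
  let f := (PySem.Dict.ofList change).getD "filename" ""
  let fl := PySem.Str.lower f
  (acc.1 || PySem.Str.isIn "service" fl,
   acc.2.1 || PySem.Str.isIn "api" fl || PySem.Str.isIn "endpoint" fl,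
   acc.2.2.1 || PySem.Str.isIn "model" fl || PySem.Str.isIn "schema" fl || PySem.Str.isIn "migration" fl,
   acc.2.2.2.1 || PySem.Str.endswith f ".tsx" || PySem.Str.endswith f ".jsx" || PySem.Str.endswith f ".vue" || PySem.Str.endswith f ".svelte",
   acc.2.2.2.2.1 || ((PySem.Str.endswith f ".yml" || PySem.Str.endswith f ".yaml" || PySem.Str.endswith f ".toml" || PySem.Str.endswith f ".json") && PySem.Str.isIn "config" fl),
   acc.2.2.2.2.2 || PySem.Str.isIn "docker" fl || f == "Dockerfile")

def detect_architecture_patterns_py_alt (file_changes : List (List (String × String))) : List String :=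
  let flags := file_changes.foldl pvStep (false, false, false, false, false, false)
  (if flags.1 then ["Microservices"] else []) ++
  (if flags.2.1 then ["REST API"] else []) ++
  (if flags.2.2.1 then ["Database Layer"] else []) ++
  (if flags.2.2.2.1 then ["Component-Based UI"] else []) ++
  (if flags.2.2.2.2.1 then ["Configuration Management"] else []) ++
  (if flags.2.2.2.2.2 then ["Containerization"] else [])

-- ===== PRECONDITION & SPEC =====
-- A is total (it returns on every input), so Pre_ places no restriction at all
def Pre_detect_architecture_patterns_py (file_changes : List (List (String × String))) : Prop := True
instance (file_changes : List (List (String × String))) : Decidable (Pre_detect_architecture_patterns_py file_changes) := by unfold Pre_detect_architecture_patterns_py; infer_instance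
def pvWitness_detect_architecture_patterns_py : (List (List (String × String))) := [[("filename", "auth_service.py")], [("filename", "api/views.py")], [("filename", "config.yaml")], [("filename", "Dockerfile")], [("status", "added")]]
def Spec_detect_architecture_patterns_py (file_changes : List (List (String × String))) (out : List String) : Prop := out = detect_architecture_patterns_py_alt file_changes
instance (file_changes : List (List (String × String))) (out : List String) : Decidable (Spec_detect_architecture_patterns_py file_changes out) := by unfold Spec_detect_architecture_patterns_py; infer_instance

-- ===== CLAIM (what is proved, stated in full; the proofs are below) =====
def Claim_equal_detect_architecture_patterns_py : Prop := ∀ (file_changes : List (List (String × String))), Dom_detect_architecture_patterns_py file_changes → Pre_detect_architecture_patterns_py file_changes → Spec_detect_architecture_patterns_py file_changes (detect_architecture_patterns_py file_changes)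

-- ===== LEMMAS AND PROOFS =====
-- the six per-file predicates (A's per-filename tests composed with the filename lookup)
def pvQ1 (c : List (String × String)) : Bool := PySem.Str.isIn "service" (PySem.Str.lower ((PySem.Dict.ofList c).getD "filename" ""))
def pvQ2 (c : List (String × String)) : Bool := PySem.Str.isIn "api" (PySem.Str.lower ((PySem.Dict.ofList c).getD "filename" "")) || PySem.Str.isIn "endpoint" (PySem.Str.lower ((PySem.Dict.ofList c).getD "filename" ""))
def pvQ3 (c : List (String × String)) : Bool := PySem.Str.isIn "model" (PySem.Str.lower ((PySem.Dict.ofList c).getD "filename" "")) || PySem.Str.isIn "schema" (PySem.Str.lower ((PySem.Dict.ofList c).getD "filename" "")) || PySem.Str.isIn "migration" (PySem.Str.lower ((PySem.Dict.ofList c).getD "filename" ""))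
def pvQ4 (c : List (String × String)) : Bool := PySem.Str.endswith ((PySem.Dict.ofList c).getD "filename" "") ".tsx" || PySem.Str.endswith ((PySem.Dict.ofList c).getD "filename" "") ".jsx" || PySem.Str.endswith ((PySem.Dict.ofList c).getD "filename" "") ".vue" || PySem.Str.endswith ((PySem.Dict.ofList c).getD "filename" "") ".svelte"
def pvQ5 (c : List (String × String)) : Bool := (PySem.Str.endswith ((PySem.Dict.ofList c).getD "filename" "") ".yml" || PySem.Str.endswith ((PySem.Dict.ofList c).getD "filename" "") ".yaml" || PySem.Str.endswith ((PySem.Dict.ofList c).getD "filename" "") ".toml" || PySem.Str.endswith ((PySem.Dict.ofList c).getD "filename" "") ".json") && PySem.Str.isIn "config" (PySem.Str.lower ((PySem.Dict.ofList c).getD "filename" ""))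
def pvQ6 (c : List (String × String)) : Bool := PySem.Str.isIn "docker" (PySem.Str.lower ((PySem.Dict.ofList c).getD "filename" "")) || ((PySem.Dict.ofList c).getD "filename" "" == "Dockerfile")

-- A's six any-scans over the filename list, pushed through the map
theorem pvAnyA1 (fc : List (List (String × String))) :
    (fc.map (fun change => (PySem.Dict.ofList change).getD "filename" "")).any (fun f => PySem.Str.isIn "service" (PySem.Str.lower f)) = fc.any pvQ1 := by
  rw [List.any_map]; rfl
theorem pvAnyA2 (fc : List (List (String × String))) :
    (fc.map (fun change => (PySem.Dict.ofList change).getD "filename" "")).any (fun f => PySem.Str.isIn "api" (PySem.Str.lower f) || PySem.Str.isIn "endpoint" (PySem.Str.lower f)) = fc.any pvQ2 := by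
  rw [List.any_map]; rfl
theorem pvAnyA3 (fc : List (List (String × String))) :
    (fc.map (fun change => (PySem.Dict.ofList change).getD "filename" "")).any (fun f => PySem.Str.isIn "model" (PySem.Str.lower f) || PySem.Str.isIn "schema" (PySem.Str.lower f) || PySem.Str.isIn "migration" (PySem.Str.lower f)) = fc.any pvQ3 := by
  rw [List.any_map]; rfl
theorem pvAnyA4 (fc : List (List (String × String))) :
    (fc.map (fun change => (PySem.Dict.ofList change).getD "filename" "")).any (fun f => PySem.Str.endswith f ".tsx" || PySem.Str.endswith f ".jsx" || PySem.Str.endswith f ".vue" || PySem.Str.endswith f ".svelte") = fc.any pvQ4 := by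
  rw [List.any_map]; rfl
theorem pvAnyA5 (fc : List (List (String × String))) :
    (fc.map (fun change => (PySem.Dict.ofList change).getD "filename" "")).any (fun f => (PySem.Str.endswith f ".yml" || PySem.Str.endswith f ".yaml" || PySem.Str.endswith f ".toml" || PySem.Str.endswith f ".json") && PySem.Str.isIn "config" (PySem.Str.lower f)) = fc.any pvQ5 := by
  rw [List.any_map]; rfl
theorem pvAnyA6 (fc : List (List (String × String))) :
    (fc.map (fun change => (PySem.Dict.ofList change).getD "filename" "")).any (fun f => PySem.Str.isIn "docker" (PySem.Str.lower f) || f == "Dockerfile") = fc.any pvQ6 := by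
  rw [List.any_map]; rfl

-- B's loop step is exactly the six predicates OR-ed into the flags
theorem pvStep_eq : pvStep = fun acc c =>
    (acc.1 || pvQ1 c, acc.2.1 || pvQ2 c, acc.2.2.1 || pvQ3 c,
     acc.2.2.2.1 || pvQ4 c, acc.2.2.2.2.1 || pvQ5 c, acc.2.2.2.2.2 || pvQ6 c) := by
  funext acc c
  simp only [pvStep, pvQ1, pvQ2, pvQ3, pvQ4, pvQ5, pvQ6, Bool.or_assoc]

-- a fold that ORs six predicates into six flags computes six `any`s
theorem foldl_or6 {α : Type} (p1 p2 p3 p4 p5 p6 : α → Bool) (l : List α)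
    (a1 a2 a3 a4 a5 a6 : Bool) :
    l.foldl (fun acc x => (acc.1 || p1 x, acc.2.1 || p2 x, acc.2.2.1 || p3 x,
      acc.2.2.2.1 || p4 x, acc.2.2.2.2.1 || p5 x, acc.2.2.2.2.2 || p6 x))
      (a1, a2, a3, a4, a5, a6) =
      (a1 || l.any p1, a2 || l.any p2, a3 || l.any p3,
       a4 || l.any p4, a5 || l.any p5, a6 || l.any p6) := by
  induction l generalizing a1 a2 a3 a4 a5 a6 with
  | nil => simp
  | cons c t ih => simp [ih, Bool.or_assoc]

-- ===== VERDICT (by name: the statement is the Claim_ definition above) =====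
theorem detect_architecture_patterns_py_spec : Claim_equal_detect_architecture_patterns_py := by
  intro fc _ _
  unfold Spec_detect_architecture_patterns_py
  show detect_architecture_patterns_py fc = detect_architecture_patterns_py_alt fc
  simp only [detect_architecture_patterns_py, detect_architecture_patterns_py_alt,
    pvStep_eq, foldl_or6 pvQ1 pvQ2 pvQ3 pvQ4 pvQ5 pvQ6 fc false false false false false false,
    pvAnyA1, pvAnyA2, pvAnyA3, pvAnyA4, pvAnyA5, pvAnyA6, Bool.false_or]
  split_ifs <;> rfl
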